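-- pv_equiv track=rewrite | github.com/MichalHe/amaya | smtlib_parse.py | lex_quoted_symbol
-- ===== SOURCE A (Python) =====
-- def lex_quoted_symbol(src_text: str, start: int):
--     start += 1  # Skip the " at the beginning
--
--     pos = start
--     found_symbol_end = False
--     while (not found_symbol_end) and pos < len(src_text):
--         current_char = src_text[pos]
--         if current_char == '|':
--             found_symbol_end = True
--         elif current_char == '\\':
--             # \ cannot be contained inside quoted symbol
--             raise ValueError('Error while parsing quoted symbol - cannot contain \'\\\'')
--         pos += 1
--
--     if not found_symbol_end:
--         raise ValueError('Could not locate quoted symbol end (reached EOF)')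
--     else:
--         return src_text[start:pos-1], pos
-- ===== SOURCE B (Python) =====
-- def lex_quoted_symbol(src_text: str, start: int):
--     start += 1  # Skip the " at the beginning
--     bar = src_text.find('|', start)
--     bslash = src_text.find('\\', start)
--     if bslash != -1 and (bar == -1 or bslash < bar):
--         raise ValueError('Error while parsing quoted symbol - cannot contain \'\\\'')
--     if bar == -1:
--         raise ValueError('Could not locate quoted symbol end (reached EOF)')
--     return src_text[start:bar], bar + 1
-- ===== Notes on version B (the rewrite author's own statement) =====
-- stated objective: simpler
-- what changed: The explicit character-by-character while loop with a found flag is replaced by two str.find calls (for '|' and '\') and a comparison of the two indices, preserving A's error precedence (backslash before EOF).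
-- outside the precondition, e.g. on lex_quoted_symbol('a|b', -3): A returns ('', -1), B returns ('', 2)
import Mathlib
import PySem

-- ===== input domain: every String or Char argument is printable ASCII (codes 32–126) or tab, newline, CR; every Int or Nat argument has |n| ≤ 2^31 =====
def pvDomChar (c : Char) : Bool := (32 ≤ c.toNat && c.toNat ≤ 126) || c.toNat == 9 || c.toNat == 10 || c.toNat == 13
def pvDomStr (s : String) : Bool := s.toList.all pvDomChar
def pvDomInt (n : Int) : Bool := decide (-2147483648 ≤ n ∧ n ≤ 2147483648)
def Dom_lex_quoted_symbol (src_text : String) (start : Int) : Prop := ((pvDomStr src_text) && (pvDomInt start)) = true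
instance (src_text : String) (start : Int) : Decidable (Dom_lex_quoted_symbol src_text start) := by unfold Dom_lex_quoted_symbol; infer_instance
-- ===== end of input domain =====

-- B replaces A's explicit character-scan loop by two str.find calls plus an index comparison (same cost, simpler).


-- ===== PORT A =====
-- A's while loop: scan from pos; set found on '|'; on '\' Python raises ValueError (here: return with
-- found = false — every raising input is outside Pre_lex_quoted_symbol, so the value there is never claimed).
def lexQSLoop (cs : List Char) (pos : Int) (found : Bool) : Bool × Int :=
  if _h : found = false ∧ pos < (cs.length : Int) then
    match PySem.List.pyGet? cs pos with
    | some c =>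
      if c = '|' then lexQSLoop cs (pos + 1) true
      else if c = '\\' then (false, pos)       -- Python: raise ValueError (backslash); outside Pre_
      else lexQSLoop cs (pos + 1) false
    | none => (false, pos)                      -- IndexError (negative pos out of range); outside Pre_
  else (found, pos)
termination_by (cs.length - pos).toNat
decreasing_by all_goals omega

def lex_quoted_symbol (src_text : String) (start : Int) : String × Int :=
  let start := start + 1
  let r := lexQSLoop src_text.toList start false
  if r.1 = false then ("", 0)                   -- Python: raise ValueError (reached EOF); outside Pre_
  else (PySem.Str.slice src_text (some start) (some (r.2 - 1)), r.2)

-- ===== PORT B =====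
def lex_quoted_symbol_alt (src_text : String) (start : Int) : String × Int :=
  let start := start + 1
  let bar := PySem.Str.findFrom src_text "|" start
  let bslash := PySem.Str.findFrom src_text "\\" start
  if bslash ≠ -1 ∧ (bar = -1 ∨ bslash < bar) then ("", 0)   -- Python: raise ValueError (backslash); outside Pre_
  else if bar = -1 then ("", 0)                              -- Python: raise ValueError (reached EOF); outside Pre_
  else (PySem.Str.slice src_text (some start) (some bar), bar + 1)

-- ===== PRECONDITION & SPEC =====
-- Pre_ excludes the inputs on which A raises ValueError (a backslash before the closing '|', or no
-- closing '|' up to EOF), and restricts to the natural domain start ≥ -1 (start points at the opening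
-- '|'); for start ≤ -2 A's scan goes through Python negative-index wraparound, an implementation accident.
def Pre_lex_quoted_symbol (src_text : String) (start : Int) : Prop :=
  -1 ≤ start ∧
  '|' ∈ src_text.toList.drop (start + 1).toNat ∧
  '\\' ∉ (src_text.toList.drop (start + 1).toNat).take
            ((src_text.toList.drop (start + 1).toNat).idxOf '|')
instance (src_text : String) (start : Int) : Decidable (Pre_lex_quoted_symbol src_text start) := by
  unfold Pre_lex_quoted_symbol; infer_instance

def pvWitness_lex_quoted_symbol : String × Int := ("|abc|", 0)

def Spec_lex_quoted_symbol (src_text : String) (start : Int) (out : String × Int) : Prop := out = lex_quoted_symbol_alt src_text start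
instance (src_text : String) (start : Int) (out : String × Int) : Decidable (Spec_lex_quoted_symbol src_text start out) := by unfold Spec_lex_quoted_symbol; infer_instance

-- ===== CLAIM (what is proved, stated in full; the proofs are below) =====
def Claim_equal_lex_quoted_symbol : Prop := ∀ (src_text : String) (start : Int), Dom_lex_quoted_symbol src_text start → Pre_lex_quoted_symbol src_text start → Spec_lex_quoted_symbol src_text start (lex_quoted_symbol src_text start)

-- ===== LEMMAS AND PROOFS =====

lemma singleton_prefix_iff (c : Char) (l : List Char) : [c] <+: l ↔ l[0]? = some c := by
  cases l with
  | nil => simp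
  | cons x t => simp [List.cons_prefix_cons]; exact eq_comm

-- s.find(c) for a single character c present in s is the first index of c.
lemma find_singleton_of_mem {cs : List Char} {c : Char} (h : c ∈ cs) :
    PySem.Chars.find cs [c] = (cs.idxOf c : Int) := by
  have hnn : 0 ≤ PySem.Chars.find cs [c] := by
    rw [PySem.Chars.find_nonneg_iff]
    exact (List.singleton_infix_iff c cs).mpr h
  obtain ⟨H1, H2⟩ := PySem.Chars.find_spec hnn
  rw [singleton_prefix_iff, List.getElem?_drop, Nat.add_zero] at H1
  have hle : (PySem.Chars.find cs [c]).toNat ≤ cs.idxOf c := by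
    by_contra hlt
    push Not at hlt
    exact H2 _ hlt ((singleton_prefix_iff c _).mpr (by
      rw [List.getElem?_drop, Nat.add_zero]; exact List.getElem?_idxOf h))
  have hge : cs.idxOf c ≤ (PySem.Chars.find cs [c]).toNat := by
    have hmem : c ∈ cs.take ((PySem.Chars.find cs [c]).toNat + 1) := by
      apply List.mem_of_getElem? (i := (PySem.Chars.find cs [c]).toNat)
      rw [List.getElem?_take]
      simp [H1]
    have := (List.mem_take_iff_idxOf_lt h).mp hmem
    omega
  have : PySem.Chars.find cs [c] = ((PySem.Chars.find cs [c]).toNat : Int) :=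
    (Int.toNat_of_nonneg hnn).symm
  rw [this]
  exact_mod_cast congrArg (Nat.cast : Nat → Int) (Nat.le_antisymm hle hge)

lemma find_singleton_of_not_mem {cs : List Char} {c : Char} (h : c ∉ cs) :
    PySem.Chars.find cs [c] = -1 := by
  rw [PySem.Chars.find_eq_neg_one_iff]
  exact fun hinf => h ((List.singleton_infix_iff c cs).mp hinf)

-- A's loop, started at a nonnegative position n whose suffix contains '|' with no earlier '\',
-- terminates with found = true just past the first '|'.
lemma loop_char : ∀ (fuel : Nat) (cs : List Char) (n : Nat), cs.length - n ≤ fuel →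
    '|' ∈ cs.drop n →
    '\\' ∉ (cs.drop n).take ((cs.drop n).idxOf '|') →
    lexQSLoop cs (n : Int) false = (true, ((n + (cs.drop n).idxOf '|' + 1 : Nat) : Int)) := by
  intro fuel
  induction fuel with
  | zero =>
    intro cs n hf hm _
    exfalso
    have : cs.length ≤ n := by omega
    rw [List.drop_eq_nil_of_le this] at hm
    simp at hm
  | succ fuel ih =>
    intro cs n hf hm hb
    have hlt : n < cs.length := by
      by_contra hge
      push Not at hge
      rw [List.drop_eq_nil_of_le hge] at hm
      simp at hm
    have hdrop : cs.drop n = cs[n] :: cs.drop (n + 1) := List.drop_eq_getElem_cons hlt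
    rw [lexQSLoop]
    have hget : PySem.List.pyGet? cs (n : Int) = some cs[n] := by
      simp [PySem.List.pyGet?_natCast, List.getElem?_eq_getElem hlt]
    rw [dif_pos ⟨rfl, by exact_mod_cast hlt⟩, hget]
    dsimp only
    by_cases hbar : cs[n] = '|'
    · rw [if_pos hbar]
      rw [lexQSLoop, dif_neg (by simp)]
      have hidx : (cs.drop n).idxOf '|' = 0 := by
        rw [hdrop]; exact List.idxOf_cons_eq _ hbar
      rw [hidx]
      simp only [Prod.mk.injEq, true_and]; push_cast; ring
    · rw [if_neg hbar]
      have hidx : (cs.drop n).idxOf '|' = (cs.drop (n+1)).idxOf '|' + 1 := by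
        rw [hdrop]; exact List.idxOf_cons_ne _ hbar
      have hm' : '|' ∈ cs.drop (n+1) := by
        rw [hdrop] at hm
        rcases List.mem_cons.mp hm with h | h
        · exact absurd h.symm hbar
        · exact h
      have htake : (cs.drop n).take ((cs.drop n).idxOf '|')
          = cs[n] :: (cs.drop (n+1)).take ((cs.drop (n+1)).idxOf '|') := by
        rw [hidx, hdrop, List.take_succ_cons]
      rw [htake] at hb
      have hbs : cs[n] ≠ '\\' := fun hc => hb (by rw [hc]; exact List.mem_cons_self)
      have hb' : '\\' ∉ (cs.drop (n+1)).take ((cs.drop (n+1)).idxOf '|') :=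
        fun hc => hb (List.mem_cons_of_mem _ hc)
      rw [if_neg hbs]
      have := ih cs (n + 1) (by omega) hm' hb'
      rw [show (n : Int) + 1 = ((n + 1 : Nat) : Int) by push_cast; ring, this, hidx]
      simp only [Prod.mk.injEq, true_and]; push_cast; ring

-- ===== VERDICT (by name: the statement is the Claim_ definition above) =====
theorem lex_quoted_symbol_spec : Claim_equal_lex_quoted_symbol := by
  intro src start _ hpre
  obtain ⟨h1, h2, h3⟩ := hpre
  unfold Spec_lex_quoted_symbol
  have hp0 : start + 1 = (((start + 1).toNat : Nat) : Int) := (Int.toNat_of_nonneg (by omega)).symm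
  generalize hn : (start + 1).toNat = n at *
  have hnlen : n < src.toList.length := by
    by_contra hge
    push Not at hge
    rw [List.drop_eq_nil_of_le hge] at h2
    simp at h2
  have hloop := loop_char src.toList.length src.toList n (by omega) h2 h3
  have hfind : PySem.Chars.find (src.toList.drop n) ['|']
      = ((src.toList.drop n).idxOf '|' : Int) := find_singleton_of_mem h2
  have hffbar : PySem.Str.findFrom src "|" (start + 1) none
      = (n : Int) + ((src.toList.drop n).idxOf '|' : Int) := by
    rw [PySem.Str.findFrom_eq, hp0, show ("|" : String).toList = ['|'] from rfl,
      PySem.Chars.findFrom_natCast _ _ n (le_of_lt hnlen), hfind]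
    rw [if_neg (by omega)]
  have hidxlt : ∀ _h : '\\' ∈ src.toList.drop n,
      (src.toList.drop n).idxOf '|' < (src.toList.drop n).idxOf '\\' := by
    intro hbs
    have hne : (src.toList.drop n).idxOf '|' ≠ (src.toList.drop n).idxOf '\\' := by
      intro he
      have e1 := List.getElem?_idxOf h2
      have e2 := List.getElem?_idxOf hbs
      rw [← he] at e2
      rw [e1] at e2
      simp at e2
    have := (List.mem_take_iff_idxOf_lt hbs).not.mp h3
    omega
  have hB : lex_quoted_symbol_alt src start
      = (PySem.Str.slice src (some (start + 1))
            (some ((n : Int) + ((src.toList.drop n).idxOf '|' : Int))),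
          (n : Int) + ((src.toList.drop n).idxOf '|' : Int) + 1) := by
    show (let start := start + 1
          let bar := PySem.Str.findFrom src "|" start
          let bslash := PySem.Str.findFrom src "\\" start
          if bslash ≠ -1 ∧ (bar = -1 ∨ bslash < bar) then ("", 0)
          else if bar = -1 then ("", 0)
          else (PySem.Str.slice src (some start) (some bar), bar + 1)) = _
    simp only
    rw [hffbar]
    by_cases hbs : '\\' ∈ src.toList.drop n
    · have hffbs : PySem.Str.findFrom src "\\" (start + 1) none
          = (n : Int) + ((src.toList.drop n).idxOf '\\' : Int) := by
        rw [PySem.Str.findFrom_eq, hp0, show ("\\" : String).toList = ['\\'] from rfl,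
          PySem.Chars.findFrom_natCast _ _ n (le_of_lt hnlen), find_singleton_of_mem hbs]
        rw [if_neg (by omega)]
      rw [hffbs]
      have hlt := hidxlt hbs
      rw [if_neg (fun h => by rcases h.2 with hc | hc <;> omega)]
      rw [if_neg (by omega)]
    · have hffbs : PySem.Str.findFrom src "\\" (start + 1) none = -1 := by
        rw [PySem.Str.findFrom_eq, hp0, show ("\\" : String).toList = ['\\'] from rfl,
          PySem.Chars.findFrom_natCast _ _ n (le_of_lt hnlen), find_singleton_of_not_mem hbs]
        simp
      rw [hffbs]
      rw [if_neg (by simp)]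
      rw [if_neg (by omega)]
  have hA : lex_quoted_symbol src start
      = (PySem.Str.slice src (some (start + 1))
            (some ((n : Int) + ((src.toList.drop n).idxOf '|' : Int))),
          (n : Int) + ((src.toList.drop n).idxOf '|' : Int) + 1) := by
    show (let start := start + 1
          let r := lexQSLoop src.toList start false
          if r.1 = false then ("", 0)
          else (PySem.Str.slice src (some start) (some (r.2 - 1)), r.2)) = _
    simp only
    rw [hp0, hloop]
    simp only [Bool.true_eq_false, if_false]
    have : ((((n + (src.toList.drop n).idxOf '|' + 1 : Nat)) : Int) - 1)
        = (n : Int) + ((src.toList.drop n).idxOf '|' : Int) := by push_cast; ring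
    rw [this]
    congr 1
  rw [hA, hB]
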